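-- pv_equiv track=rewrite | github.com/yehonatan145/PatternMatching | Streams/write_first_lines.py | convert_to_int_list
-- ===== SOURCE A (Python) =====
-- def get_binary_val(c):
-- 	if c >= '0' and c <= '9':
-- 		return ord(c) - ord('0')
-- 	elif c >= 'a' and c <= 'f':
-- 		return 10 + ord(c) - ord('a')
-- 	elif c >= 'A' and c <= 'F':
-- 		return 10 + ord(c) - ord('A')
-- 	else:
-- 		return -1
--
-- def convert_to_int_list(line):
-- 	ret = []
-- 	is_binary_mode = False
-- 	prev_val = -1
-- 	for c in line:
-- 		if c == '|':
-- 			is_binary_mode = not is_binary_mode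
-- 			prev_val = -1
-- 		elif is_binary_mode:
-- 			if c == ' ':
-- 				continue
-- 			bin_val = get_binary_val(c)
-- 			if bin_val == -1:
-- 				return ret
-- 			if prev_val == -1:
-- 				prev_val = bin_val
-- 			else:
-- 				ret.append(prev_val * 16 + bin_val)
-- 				prev_val = -1
-- 		else:
-- 			ret.append(ord(c))
-- 	return ret
-- ===== SOURCE B (Python) =====
-- def _nibble(c):
--     if '0' <= c <= '9':
--         return ord(c) - 48
--     if 'a' <= c <= 'f':
--         return ord(c) - 87
--     if 'A' <= c <= 'F':
--         return ord(c) - 55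
--     return -1
--
-- def convert_to_int_list(line):
--     ret = []
--     for i, seg in enumerate(line.split('|')):
--         if i % 2 == 0:
--             for c in seg:
--                 ret.append(ord(c))
--         else:
--             prev = -1
--             for c in seg:
--                 if c == ' ':
--                     continue
--                 v = _nibble(c)
--                 if v == -1:
--                     return ret
--                 if prev == -1:
--                     prev = v
--                 else:
--                     ret.append(prev * 16 + v)
--                     prev = -1
--     return ret
-- ===== Notes on version B (the rewrite author's own statement) =====
-- stated objective: alternative
-- what changed: Replaced A's single per-character loop with a toggling is_binary_mode flag by splitting the line on '|' and traversing the segments with their index: even-indexed segments are mapped to character codes, odd-indexed segments are scanned for hex nibble pairs with early return on an invalid hex character.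
import Mathlib
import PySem

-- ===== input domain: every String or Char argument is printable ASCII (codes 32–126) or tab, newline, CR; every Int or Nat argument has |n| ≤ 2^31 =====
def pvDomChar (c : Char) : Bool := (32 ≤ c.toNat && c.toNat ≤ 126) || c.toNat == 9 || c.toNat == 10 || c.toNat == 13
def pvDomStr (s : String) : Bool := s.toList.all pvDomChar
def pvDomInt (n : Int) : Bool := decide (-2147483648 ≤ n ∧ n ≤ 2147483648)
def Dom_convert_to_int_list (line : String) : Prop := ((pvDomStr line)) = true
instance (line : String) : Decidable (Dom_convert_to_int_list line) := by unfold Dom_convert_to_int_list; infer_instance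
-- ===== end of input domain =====

-- B replaces A's per-character toggle-flag state machine by split('|') plus a
-- segment-indexed two-level traversal (even index = text, odd = hex pairs);
-- objective: alternative decomposition, same behaviour and cost.

-- ===== PORT A =====
def get_binary_val (c : Char) : Int :=
  if c ≥ '0' ∧ c ≤ '9' then (c.toNat : Int) - ('0'.toNat : Int)
  else if c ≥ 'a' ∧ c ≤ 'f' then 10 + (c.toNat : Int) - ('a'.toNat : Int)
  else if c ≥ 'A' ∧ c ≤ 'F' then 10 + (c.toNat : Int) - ('A'.toNat : Int)
  else -1

-- A's character loop; state = (ret, is_binary_mode, prev_val)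
def aLoop : List Char → List Int → Bool → Int → List Int
  | [], ret, _, _ => ret
  | c :: cs, ret, b, p =>
    if c = '|' then aLoop cs ret (!b) (-1)
    else if b then
      if c = ' ' then aLoop cs ret b p
      else
        let v := get_binary_val c
        if v = -1 then ret
        else if p = -1 then aLoop cs ret b v
        else aLoop cs (ret ++ [p * 16 + v]) b (-1)
    else aLoop cs (ret ++ [(c.toNat : Int)]) b p

def convert_to_int_list (line : String) : List Int :=
  aLoop line.toList [] false (-1)

-- ===== PORT B =====
def pvNibble (c : Char) : Int :=
  if '0' ≤ c ∧ c ≤ '9' then (c.toNat : Int) - 48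
  else if 'a' ≤ c ∧ c ≤ 'f' then (c.toNat : Int) - 87
  else if 'A' ≤ c ∧ c ≤ 'F' then (c.toNat : Int) - 55
  else -1

-- inner loop over one binary segment; Bool = "reached the segment end" (false = early return)
def pvBinSeg : List Char → List Int → Int → List Int × Bool
  | [], ret, _ => (ret, true)
  | c :: cs, ret, p =>
    if c = ' ' then pvBinSeg cs ret p
    else
      let v := pvNibble c
      if v = -1 then (ret, false)
      else if p = -1 then pvBinSeg cs ret v
      else pvBinSeg cs (ret ++ [p * 16 + v]) (-1)

-- outer loop over the segments of line.split('|'), with their index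
def pvSegLoop : Nat → List (List Char) → List Int → List Int
  | _, [], ret => ret
  | i, seg :: rest, ret =>
    if i % 2 = 0 then pvSegLoop (i + 1) rest (ret ++ seg.map (fun c => (c.toNat : Int)))
    else
      match pvBinSeg seg ret (-1) with
      | (ret', true) => pvSegLoop (i + 1) rest ret'
      | (ret', false) => ret'

-- line.split('|') ported as List.splitOn '|' on the code points (exact for a one-char separator)
def convert_to_int_list_alt (line : String) : List Int :=
  pvSegLoop 0 (line.toList.splitOn '|') []

-- ===== PRECONDITION & SPEC =====
def Spec_convert_to_int_list (line : String) (out : List Int) : Prop := out = convert_to_int_list_alt line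
instance (line : String) (out : List Int) : Decidable (Spec_convert_to_int_list line out) := by unfold Spec_convert_to_int_list; infer_instance

-- ===== CLAIM (what is proved, stated in full; the proofs are below) =====
def Claim_equal_convert_to_int_list : Prop := ∀ (line : String), Dom_convert_to_int_list line → Spec_convert_to_int_list line (convert_to_int_list line)

-- ===== LEMMAS AND PROOFS =====

theorem pvNibble_eq (c : Char) : pvNibble c = get_binary_val c := by
  unfold pvNibble get_binary_val
  split_ifs <;>
    simp only [show '0'.toNat = 48 from rfl, show 'a'.toNat = 97 from rfl,
      show 'A'.toNat = 65 from rfl] <;> omega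

theorem splitOn_cons_char (c : Char) (cs : List Char) :
    (c :: cs).splitOn '|' =
      if c = '|' then [] :: cs.splitOn '|' else (cs.splitOn '|').modifyHead (c :: ·) := by
  simp [List.splitOn, List.splitOnP_cons]

theorem splitOn_char_ne_nil (cs : List Char) : cs.splitOn '|' ≠ [] := by
  unfold List.splitOn; exact List.splitOnP_ne_nil _ cs

-- The heart of the equivalence: A's state machine, run from either mode, equals
-- B's segment traversal of the split of the remaining characters.
theorem pvMain (cs : List Char) :
    (∀ ret p i, i % 2 = 0 → aLoop cs ret false p = pvSegLoop i (cs.splitOn '|') ret) ∧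
    (∀ ret p i s t, i % 2 = 1 → cs.splitOn '|' = s :: t →
      aLoop cs ret true p =
        (match pvBinSeg s ret p with
          | (r, true) => pvSegLoop (i + 1) t r
          | (r, false) => r)) := by
  induction cs with
  | nil =>
    constructor
    · intro ret p i hi
      simp [List.splitOn_nil, aLoop, pvSegLoop, hi]
    · intro ret p i s t hi h
      simp [List.splitOn_nil] at h
      obtain ⟨rfl, rfl⟩ := h
      simp [aLoop, pvBinSeg, pvSegLoop]
  | cons c cs ih =>
    obtain ⟨ihEven, ihBin⟩ := ih
    constructor
    · -- text mode
      intro ret p i hi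
      rw [splitOn_cons_char]
      by_cases hc : c = '|'
      · subst hc
        obtain ⟨s, t, hst⟩ := List.exists_cons_of_ne_nil (splitOn_char_ne_nil cs)
        rw [if_pos rfl, aLoop, if_pos rfl]
        simp only [Bool.not_false]
        rw [ihBin ret (-1) (i + 1) s t (by omega) hst, hst]
        have h1 : ¬ (i + 1) % 2 = 0 := by omega
        simp [pvSegLoop, hi, h1]
      · obtain ⟨s, t, hst⟩ := List.exists_cons_of_ne_nil (splitOn_char_ne_nil cs)
        rw [if_neg hc, hst]
        simp only [List.modifyHead]
        rw [show aLoop (c :: cs) ret false p = aLoop cs (ret ++ [(c.toNat : Int)]) false p from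
          by simp [aLoop, hc]]
        rw [ihEven (ret ++ [(c.toNat : Int)]) p i hi, hst]
        simp [pvSegLoop, hi]
    · -- binary mode
      intro ret p i s t hi h
      rw [splitOn_cons_char] at h
      by_cases hc : c = '|'
      · subst hc
        rw [if_pos rfl] at h
        injection h with h1 h2
        subst h1
        rw [aLoop, if_pos rfl]
        simp only [Bool.not_true]
        rw [ihEven ret (-1) (i + 1) (by omega), h2]
        simp [pvBinSeg]
      · rw [if_neg hc] at h
        obtain ⟨s', t', hst⟩ := List.exists_cons_of_ne_nil (splitOn_char_ne_nil cs)
        rw [hst] at h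
        simp only [List.modifyHead] at h
        injection h with h1 h2
        subst h1; subst h2
        by_cases hsp : c = ' '
        · subst hsp
          rw [show aLoop (' ' :: cs) ret true p = aLoop cs ret true p from by simp [aLoop, hc]]
          rw [ihBin ret p i s' t' hi hst]
          simp [pvBinSeg]
        · rw [aLoop, if_neg hc, if_pos rfl, if_neg hsp]
          rw [pvBinSeg, if_neg hsp]
          simp only [pvNibble_eq]
          by_cases hv : get_binary_val c = -1
          · simp [hv]
          · rw [if_neg hv, if_neg hv]
            by_cases hp : p = -1
            · rw [if_pos hp, if_pos hp]
              exact ihBin ret (get_binary_val c) i s' t' hi hst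
            · rw [if_neg hp, if_neg hp]
              exact ihBin (ret ++ [p * 16 + get_binary_val c]) (-1) i s' t' hi hst

-- ===== VERDICT (by name: the statement is the Claim_ definition above) =====
theorem convert_to_int_list_spec : Claim_equal_convert_to_int_list := by
  intro line _
  unfold Spec_convert_to_int_list convert_to_int_list convert_to_int_list_alt
  exact (pvMain line.toList).1 [] (-1) 0 rfl
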